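-- pv_equiv track=rewrite | github.com/Stevecv/Chess | Main.py | raycastDownRight
-- ===== SOURCE A (Python) =====
-- data = [2,  4,  3,  1,  0,  3,  4,  2,
--         5,  5,  5,  5,  5,  5,  5,  5,
--         12, 12, 12, 12, 12, 12, 12, 12,
--         12, 12, 12, 12, 12, 12, 12, 12,
--         12, 12, 12, 12, 12, 12, 12, 12,
--         12, 12, 12, 12, 12, 12, 12, 12,
--         11, 11, 11, 11, 11, 11, 11, 11,
--         8,  10, 9,  7,  6,  9,  10, 8]
--
-- def raycastDownRight(f, c):
--   moves = []
--   if (f % 8 == 0):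
--     return moves
--   for i in range(1,c+1):
--     place = (f+i)+(8*i)
--     if place >= 0:
--       if place > 63:
--         break
--       if (place % 8 == 0):
--         break
--       moves.append(place)
--       if data[place] != 12:
--         break
--
--   return moves
-- ===== SOURCE B (Python) =====
-- data = [2,  4,  3,  1,  0,  3,  4,  2,
--         5,  5,  5,  5,  5,  5,  5,  5,
--         12, 12, 12, 12, 12, 12, 12, 12,
--         12, 12, 12, 12, 12, 12, 12, 12,
--         12, 12, 12, 12, 12, 12, 12, 12,
--         12, 12, 12, 12, 12, 12, 12, 12,
--         11, 11, 11, 11, 11, 11, 11, 11,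
--         8,  10, 9,  7,  6,  9,  10, 8]
--
-- def raycastDownRight(f, c):
--   if f % 8 == 0:
--     return []
--   # Closed-form geometry: the down-right diagonal from square f has
--   # min(7 - file, 7 - rank) squares; take at most c of them.
--   n = min(c, 7 - f % 8, 7 - f // 8)
--   ray = [f + 9 * i for i in range(1, n + 1)]
--   # Cut the ray at the first occupied square (kept in the ray).
--   for k, sq in enumerate(ray):
--     if data[sq] != 12:
--       return ray[:k + 1]
--   return ray
-- ===== Notes on version B (the rewrite author's own statement) =====
-- stated objective: alternative
-- what changed: B computes the ray length in closed form (min of c and the distances to the right and bottom board edges) and builds the candidate squares with one range comprehension, then cuts the list at the first occupied square in a separate pass, instead of A's single fused loop that re-tests board bounds, file wrap and occupancy at every step; Pre_ excludes negative (off-board) start squares f, where A's values arise only from its accidental skip of negative intermediate squares.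
-- outside the precondition, e.g. on raycastDownRight(-20, 5): A returns [7], B returns [-11]
import Mathlib
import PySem

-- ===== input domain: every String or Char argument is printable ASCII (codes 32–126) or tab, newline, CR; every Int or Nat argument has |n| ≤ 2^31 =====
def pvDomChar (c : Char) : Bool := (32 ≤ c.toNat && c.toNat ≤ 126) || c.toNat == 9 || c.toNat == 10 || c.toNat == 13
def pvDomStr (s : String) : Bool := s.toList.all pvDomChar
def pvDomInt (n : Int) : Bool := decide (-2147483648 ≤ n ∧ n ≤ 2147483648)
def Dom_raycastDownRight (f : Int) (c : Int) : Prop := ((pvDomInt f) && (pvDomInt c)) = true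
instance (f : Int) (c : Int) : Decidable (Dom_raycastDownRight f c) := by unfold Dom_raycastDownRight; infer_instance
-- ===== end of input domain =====

-- B replaces A's fused per-step ray loop by a closed-form ray length (min of c and the two
-- distances to the board edges) followed by a separate cut at the first occupied square;
-- alternative decomposition, same cost. Pre_ restricts f to f >= 0 (off-board negative
-- start squares, where A's skip-and-continue behaviour is accidental, are excluded).


-- the module-level board `data`
def chessData : List Int :=
  [2, 4, 3, 1, 0, 3, 4, 2,
   5, 5, 5, 5, 5, 5, 5, 5,
   12, 12, 12, 12, 12, 12, 12, 12,
   12, 12, 12, 12, 12, 12, 12, 12,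
   12, 12, 12, 12, 12, 12, 12, 12,
   12, 12, 12, 12, 12, 12, 12, 12,
   11, 11, 11, 11, 11, 11, 11, 11,
   8, 10, 9, 7, 6, 9, 10, 8]

-- ===== PORT A =====
-- A's for-loop over i ∈ range(1, c+1); fuel = number of remaining iterations.
-- data[place] is only read with 0 ≤ place ≤ 63, so pyGetD with default 0 is exact.
def rayLoopA (f : Int) (i : Int) (fuel : Nat) (moves : List Int) : List Int :=
  match fuel with
  | 0 => moves
  | fuel + 1 =>
    if (f + i) + (8 * i) ≥ 0 then
      if (f + i) + (8 * i) > 63 then moves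
      else if PySem.Int.mod ((f + i) + (8 * i)) 8 = 0 then moves
      else if PySem.List.pyGetD chessData ((f + i) + (8 * i)) 0 ≠ 12 then moves ++ [(f + i) + (8 * i)]
      else rayLoopA f (i + 1) fuel (moves ++ [(f + i) + (8 * i)])
    else rayLoopA f (i + 1) fuel moves

def raycastDownRight (f : Int) (c : Int) : List Int :=
  if PySem.Int.mod f 8 = 0 then []
  else rayLoopA f 1 ((c + 1 - 1).toNat) []

-- ===== PORT B =====
-- second pass of Source B: scan the ray, return the prefix up to and including the first occupied square
def cutAtBlocker : List Int → List Int
  | [] => []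
  | sq :: rest =>
    if PySem.List.pyGetD chessData sq 0 ≠ 12 then [sq] else sq :: cutAtBlocker rest

def raycastDownRight_alt (f : Int) (c : Int) : List Int :=
  if PySem.Int.mod f 8 = 0 then []
  else
    cutAtBlocker ((PySem.List.pyRange 1 (min c (min (7 - PySem.Int.mod f 8) (7 - PySem.Int.floordiv f 8)) + 1) 1).map
      (fun i => f + 9 * i))

-- ===== PRECONDITION & SPEC =====
-- Pre_ excludes negative (off-board) start squares f: A still returns values there, but only
-- by accident of its 'if place >= 0: continue' skip; B treats f as a board square.
def Pre_raycastDownRight (f : Int) (c : Int) : Prop := 0 ≤ f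
instance (f : Int) (c : Int) : Decidable (Pre_raycastDownRight f c) := by unfold Pre_raycastDownRight; infer_instance
def pvWitness_raycastDownRight : Int × Int := (1, 7)

def Spec_raycastDownRight (f : Int) (c : Int) (out : List Int) : Prop := out = raycastDownRight_alt f c
instance (f : Int) (c : Int) (out : List Int) : Decidable (Spec_raycastDownRight f c out) := by unfold Spec_raycastDownRight; infer_instance

-- ===== CLAIM (what is proved, stated in full; the proofs are below) =====
def Claim_equal_raycastDownRight : Prop := ∀ (f : Int) (c : Int), Dom_raycastDownRight f c → Pre_raycastDownRight f c → Spec_raycastDownRight f c (raycastDownRight f c)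

-- ===== LEMMAS AND PROOFS =====

-- proof-only intermediate: the bare geometric walk of the diagonal (step +9)
def rayWalk (p : Int) (fuel : Nat) : List Int :=
  match fuel with
  | 0 => []
  | fuel + 1 =>
    if p < 0 then rayWalk (p + 9) fuel
    else if p ≤ 63 ∧ PySem.Int.mod p 8 ≠ 0 then p :: rayWalk (p + 9) fuel
    else []

-- A's fused loop equals the geometric walk (from the current square) cut at the blocker.
theorem rayLoopA_eq_cut (fuel : Nat) : ∀ (f i : Int) (moves : List Int),
    rayLoopA f i fuel moves = moves ++ cutAtBlocker (rayWalk ((f + i) + (8 * i)) fuel) := by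
  induction fuel with
  | zero => intro f i moves; simp [rayLoopA, rayWalk, cutAtBlocker]
  | succ n ih =>
    intro f i moves
    have hstep : (f + (i + 1)) + (8 * (i + 1)) = ((f + i) + (8 * i)) + 9 := by ring
    simp only [rayLoopA, rayWalk]
    by_cases h0 : (f + i) + (8 * i) ≥ 0
    · rw [if_pos h0, if_neg (show ¬ ((f + i) + (8 * i) < 0) by omega)]
      by_cases h63 : (f + i) + (8 * i) > 63
      · rw [if_pos h63, if_neg (by omega : ¬ ((f + i) + (8 * i) ≤ 63 ∧ PySem.Int.mod ((f + i) + (8 * i)) 8 ≠ 0))]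
        simp [cutAtBlocker]
      · rw [if_neg h63]
        by_cases hm : PySem.Int.mod ((f + i) + (8 * i)) 8 = 0
        · rw [if_pos hm, if_neg (by tauto : ¬ ((f + i) + (8 * i) ≤ 63 ∧ PySem.Int.mod ((f + i) + (8 * i)) 8 ≠ 0))]
          simp [cutAtBlocker]
        · rw [if_neg hm, if_pos (⟨by omega, hm⟩ : (f + i) + (8 * i) ≤ 63 ∧ PySem.Int.mod ((f + i) + (8 * i)) 8 ≠ 0)]
          by_cases hd : PySem.List.pyGetD chessData ((f + i) + (8 * i)) 0 ≠ 12
          · rw [if_pos hd]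
            simp [cutAtBlocker, hd]
          · rw [if_neg hd, ih, hstep]
            simp only [not_not] at hd
            simp [cutAtBlocker, hd, List.append_assoc]
    · rw [if_neg h0, if_pos (show (f + i) + (8 * i) < 0 by omega), ih, hstep]

-- beyond the bottom edge the walk is empty
theorem rayWalk_of_big (p : Int) (h : 64 ≤ p) (m : Nat) : rayWalk p m = [] := by
  cases m with
  | zero => rfl
  | succ n =>
    simp only [rayWalk]
    rw [if_neg (by omega : ¬ p < 0), if_neg (by omega : ¬ (p ≤ 63 ∧ PySem.Int.mod p 8 ≠ 0))]

-- on the board, the walk from step s is exactly the mapped range up to min(fuel, edge)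
theorem rayWalk_eq_map (f : Int) (hf0 : 0 ≤ f) (hf63 : f ≤ 63)
    (L : Int) (hL : L = min (7 - f % 8) (7 - f / 8)) :
    ∀ (m : Nat) (s : Int), 1 ≤ s → s ≤ L + 1 →
    rayWalk (f + 9 * s) m = (PySem.List.pyRange s (min (s + m) (L + 1)) 1).map (fun i => f + 9 * i) := by
  intro m
  induction m with
  | zero =>
    intro s hs1 hsL
    rw [rayWalk, PySem.List.pyRange_one_eq_nil (by omega : min (s + (0:Nat)) (L + 1) ≤ s)]
    rfl
  | succ n ih =>
    intro s hs1 hsL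
    have hmod : PySem.Int.mod (f + 9 * s) 8 = (f + 9 * s) % 8 :=
      PySem.Int.mod_eq_emod_of_pos (by omega)
    have hc8 : (f + 9 * s) % 8 = (f + s) % 8 := by
      rw [show f + 9 * s = (f + s) + 8 * s by ring, Int.add_mul_emod_self_left]
    simp only [rayWalk]
    rw [if_neg (by omega : ¬ (f + 9 * s < 0))]
    by_cases hs : s ≤ L
    · rw [if_pos (by rw [hmod]; omega : f + 9 * s ≤ 63 ∧ PySem.Int.mod (f + 9 * s) 8 ≠ 0)]
      have h9 : f + 9 * s + 9 = f + 9 * (s + 1) := by ring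
      rw [h9, ih (s + 1) (by omega) (by omega)]
      rw [PySem.List.pyRange_one_cons (show s < min (s + ((n + 1 : Nat) : Int)) (L + 1) by push_cast; omega)]
      have harg : min (s + 1 + (n : Int)) (L + 1) = min (s + (((n : Nat) + 1 : Nat) : Int)) (L + 1) := by
        push_cast; omega
      simp only [List.map_cons]
      rw [harg]
    · -- s = L + 1 : this square is off the diagonal (edge reached)
      rw [if_neg (by rw [hmod]; omega : ¬ (f + 9 * s ≤ 63 ∧ PySem.Int.mod (f + 9 * s) 8 ≠ 0))]
      rw [PySem.List.pyRange_one_eq_nil (show min (s + ((n + 1 : Nat) : Int)) (L + 1) ≤ s by push_cast; omega)]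
      rfl

-- ===== VERDICT (by name: the statement is the Claim_ definition above) =====
theorem raycastDownRight_spec : Claim_equal_raycastDownRight := by
  intro f c _ hpre
  unfold Spec_raycastDownRight raycastDownRight raycastDownRight_alt
  by_cases hf : PySem.Int.mod f 8 = 0
  · rw [if_pos hf, if_pos hf]
  · rw [if_neg hf, if_neg hf, rayLoopA_eq_cut]
    have h1 : (f + 1) + (8 * 1) = f + 9 * 1 := by ring
    have h2 : (c + 1 - 1).toNat = c.toNat := by omega
    have hmodf : PySem.Int.mod f 8 = f % 8 := PySem.Int.mod_eq_emod_of_pos (by omega)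
    have hdivf : PySem.Int.floordiv f 8 = f / 8 := PySem.Int.floordiv_eq_ediv_of_pos (by omega)
    rw [h1, h2, List.nil_append, hmodf, hdivf]
    by_cases h63 : f ≤ 63
    · -- on the board: both sides are the cut of the same geometric ray
      set L : Int := min (7 - f % 8) (7 - f / 8) with hL
      have hL0 : 0 ≤ L := by rw [hL]; omega
      by_cases hc : 0 ≤ c
      · rw [rayWalk_eq_map f hpre h63 L hL c.toNat 1 le_rfl (by omega)]
        have : min (1 + (c.toNat : Int)) (L + 1) = min c (min (7 - f % 8) (7 - f / 8)) + 1 := by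
          rw [← hL]; omega
        rw [this]
      · -- c < 0: zero fuel on the left, empty range on the right
        rw [(by omega : c.toNat = 0), rayWalk,
            PySem.List.pyRange_one_eq_nil (by omega : min c (min (7 - f % 8) (7 - f / 8)) + 1 ≤ 1)]
        rfl
    · -- f > 63: walk dies at once, and the closed-form count is negative
      rw [rayWalk_of_big _ (by omega) _,
          PySem.List.pyRange_one_eq_nil (by omega : min c (min (7 - f % 8) (7 - f / 8)) + 1 ≤ 1)]
      rfl
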